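-- pv_equiv track=rewrite | github.com/OaktonHSTech/OHS-Sound-and-Lights-Discord-bot | events/on_message.py | convert_simple_emojis
-- ===== SOURCE A (Python) =====
-- def convert_simple_emojis(text):
--     """Convert simple emoji references to full Discord emoji format"""
--     emoji_mappings = {
--         ":pls:": "<:pls:1396080923572961361>",
--         ":metagaming:": "<:metagaming:1396089073994694658>",
--         ":notlikethis:": "<:notlikethis:1396086703281672212>",
--         ":concern:": "<:concern:1396099894363816058>",
--         ":bigbrain:": "<:bigbrain:1396078525655683213>"
--     }
--
--     for simple, full in emoji_mappings.items():
--         text = text.replace(simple, full)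
--
--     return text
-- ===== SOURCE B (Python) =====
-- def convert_simple_emojis(text):
--     """Convert simple emoji references to full Discord emoji format.
--     Alternative implementation: instead of calling str.replace, each code is
--     substituted by an explicit single scan over the text (startswith at each
--     index, jumping over a match), collecting pieces and joining once per code."""
--     mappings = [
--         (":pls:", "<:pls:1396080923572961361>"),
--         (":metagaming:", "<:metagaming:1396089073994694658>"),
--         (":notlikethis:", "<:notlikethis:1396086703281672212>"),
--         (":concern:", "<:concern:1396099894363816058>"),
--         (":bigbrain:", "<:bigbrain:1396078525655683213>"),
--     ]
--     for simple, full in mappings: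
--         out = []
--         i = 0
--         n = len(simple)
--         while i < len(text):
--             if text.startswith(simple, i):
--                 out.append(full)
--                 i += n
--             else:
--                 out.append(text[i])
--                 i += 1
--         text = "".join(out)
--     return text
-- ===== Notes on version B (the rewrite author's own statement) =====
-- stated objective: alternative
-- what changed: Replaces the chain of built-in str.replace calls by a hand-written replacement engine: for each code one explicit left-to-right scan with startswith at each index (jumping over a match) that collects the output pieces and joins them once.
import Mathlib
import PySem

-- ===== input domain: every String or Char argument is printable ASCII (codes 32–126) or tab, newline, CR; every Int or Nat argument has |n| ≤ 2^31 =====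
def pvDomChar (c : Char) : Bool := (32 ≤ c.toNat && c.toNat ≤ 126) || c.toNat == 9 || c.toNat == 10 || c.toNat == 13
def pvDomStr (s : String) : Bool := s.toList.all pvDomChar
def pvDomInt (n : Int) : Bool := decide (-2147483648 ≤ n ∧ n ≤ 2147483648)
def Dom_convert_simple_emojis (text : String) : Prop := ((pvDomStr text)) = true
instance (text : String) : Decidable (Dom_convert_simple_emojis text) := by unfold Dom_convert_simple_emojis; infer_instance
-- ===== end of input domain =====

-- B replaces the chain of built-in str.replace calls by an explicit per-code scan
-- (startswith at each index, jump over a match); objective: alternative, same cost.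


-- ===== PORT A =====
-- literal port of A: one str.replace per mapping entry, in dict order
def convert_simple_emojis (text : String) : String :=
  let text := PySem.Str.replace text ":pls:" "<:pls:1396080923572961361>"
  let text := PySem.Str.replace text ":metagaming:" "<:metagaming:1396089073994694658>"
  let text := PySem.Str.replace text ":notlikethis:" "<:notlikethis:1396086703281672212>"
  let text := PySem.Str.replace text ":concern:" "<:concern:1396099894363816058>"
  let text := PySem.Str.replace text ":bigbrain:" "<:bigbrain:1396078525655683213>"
  text

-- ===== PORT B =====
-- Source B's while loop (index i over text, startswith at i, jump len(simple) on a match)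
-- as structural recursion on the remaining characters; exact for nonempty `old`
-- (all five codes are nonempty; `List.drop (old.length - 1) t` is Python's `i += n`).
def subChars (old new : List Char) : List Char → List Char
  | [] => []
  | c :: t =>
    if old.isPrefixOf (c :: t) then new ++ subChars old new (List.drop (old.length - 1) t)
    else c :: subChars old new t
termination_by s => s.length
decreasing_by
  · simp only [List.length_drop, List.length_cons]; omega
  · simp only [List.length_cons]; omega

def pvMappings : List (List Char × List Char) :=
  [ (":pls:".toList, "<:pls:1396080923572961361>".toList),
    (":metagaming:".toList, "<:metagaming:1396089073994694658>".toList),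
    (":notlikethis:".toList, "<:notlikethis:1396086703281672212>".toList),
    (":concern:".toList, "<:concern:1396099894363816058>".toList),
    (":bigbrain:".toList, "<:bigbrain:1396078525655683213>".toList) ]

def convert_simple_emojis_alt (text : String) : String :=
  String.ofList (pvMappings.foldl (fun s p => subChars p.1 p.2 s) text.toList)

-- ===== PRECONDITION & SPEC =====
def Spec_convert_simple_emojis (text : String) (out : String) : Prop := out = convert_simple_emojis_alt text
instance (text : String) (out : String) : Decidable (Spec_convert_simple_emojis text out) := by unfold Spec_convert_simple_emojis; infer_instance

-- ===== CLAIM (what is proved, stated in full; the proofs are below) =====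
def Claim_equal_convert_simple_emojis : Prop := ∀ (text : String), Dom_convert_simple_emojis text → Spec_convert_simple_emojis text (convert_simple_emojis text)

-- ===== LEMMAS AND PROOFS =====

theorem subChars_eq_go (old new : List Char) (hold : old ≠ []) :
    ∀ (fuel : Nat) (l acc : List Char), l.length ≤ fuel →
      PySem.Chars.replace.go old new fuel l acc = acc.reverse ++ subChars old new l := by
  intro fuel
  induction fuel with
  | zero =>
    intro l acc hl
    have : l = [] := List.eq_nil_of_length_eq_zero (Nat.le_zero.mp hl)
    subst this
    simp [PySem.Chars.replace.go, subChars]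
  | succ n ih =>
    intro l acc hl
    cases l with
    | nil => simp [PySem.Chars.replace.go, subChars]
    | cons c t =>
      rw [PySem.Chars.replace.go]
      by_cases hp : old.isPrefixOf (c :: t) = true
      · rw [if_pos hp]
        have hlen : 1 ≤ old.length := by
          cases old with
          | nil => exact absurd rfl hold
          | cons _ _ => simp
        have hdrop : List.drop old.length (c :: t) = List.drop (old.length - 1) t := by
          cases old with
          | nil => exact absurd rfl hold
          | cons o os => simp
        rw [hdrop, ih _ _ (by simp at hl ⊢; omega)]
        simp [subChars, hp]
      · rw [if_neg hp]
        rw [ih _ _ (by simp at hl ⊢; omega)]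
        simp [subChars, hp]

theorem replace_eq_subChars (s old new : List Char) (hold : old ≠ []) :
    PySem.Chars.replace s old new = subChars old new s := by
  rw [PySem.Chars.replace]
  rw [if_neg (by simp [List.isEmpty_iff, hold])]
  simpa using subChars_eq_go old new hold s.length s [] le_rfl

-- ===== VERDICT (by name: the statement is the Claim_ definition above) =====
theorem convert_simple_emojis_spec : Claim_equal_convert_simple_emojis := by
  intro text _
  show _ = _
  simp only [convert_simple_emojis, convert_simple_emojis_alt, PySem.Str.replace,
    pvMappings, List.foldl, String.toList_ofList]
  rw [replace_eq_subChars _ _ _ (by decide), replace_eq_subChars _ _ _ (by decide),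
      replace_eq_subChars _ _ _ (by decide), replace_eq_subChars _ _ _ (by decide),
      replace_eq_subChars _ _ _ (by decide)]
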